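-- pv_equiv track=rewrite | github.com/vraj1091/ai_tally | backend/app/services/analytics_service.py | _enhanced_categorize_ledger
-- ===== SOURCE A (Python) =====
-- def _enhanced_categorize_ledger(name: str, parent: str, is_revenue: bool, is_expense: bool) -> str:
--     """
--     Enhanced ledger categorization with comprehensive rules
--
--     Returns: 'revenue', 'expense', 'asset', 'liability', 'equity', or 'other'
--     """
--     name_lower = name.lower()
--     parent_lower = parent.lower()
--
--     # Use existing flags if available
--     if is_revenue:
--         return 'revenue'
--     if is_expense:
--         return 'expense'
--
--     # Revenue patterns (COMPREHENSIVE)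
--     revenue_patterns = [
--         'sales', 'income', 'revenue', 'receipt', 'service', 'commission',
--         'interest income', 'discount received', 'profit on sale', 'rent income',
--         'dividend', 'royalty', 'consultancy', 'fees', 'subscription', 'membership'
--     ]
--
--     # Expense patterns (COMPREHENSIVE)
--     expense_patterns = [
--         'expense', 'purchase', 'cost', 'salary', 'wages', 'rent', 'electricity',
--         'telephone', 'internet', 'fuel', 'freight', 'insurance', 'depreciation',
--         'interest paid', 'interest expense', 'bank charges', 'office', 'travelling',
--         'advertisement', 'marketing', 'repairs', 'maintenance', 'professional fees',
--         'discount allowed', 'tax', 'printing', 'stationery', 'postage', 'conveyance',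
--         'legal', 'audit', 'vehicle', 'water', 'power', 'consumables'
--     ]
--
--     # Asset patterns
--     asset_patterns = [
--         'asset', 'bank', 'cash', 'fixed asset', 'current asset', 'investment',
--         'stock', 'inventory', 'debtors', 'receivable', 'advance', 'deposit',
--         'plant', 'machinery', 'equipment', 'furniture', 'vehicle', 'building',
--         'land', 'computer'
--     ]
--
--     # Liability patterns
--     liability_patterns = [
--         'liability', 'loan', 'creditors', 'payable', 'outstanding', 'provision',
--         'duty', 'sundry creditors', 'secured loan', 'unsecured loan', 'borrowing'
--     ]
--
--     # Equity patterns
--     equity_patterns = [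
--         'capital', 'equity', 'reserve', 'surplus', 'profit and loss'
--     ]
--
--     # Check parent first (most reliable)
--     for pattern in revenue_patterns:
--         if pattern in parent_lower:
--             return 'revenue'
--
--     for pattern in expense_patterns:
--         if pattern in parent_lower:
--             return 'expense'
--
--     for pattern in asset_patterns:
--         if pattern in parent_lower:
--             return 'asset'
--
--     for pattern in liability_patterns:
--         if pattern in parent_lower:
--             return 'liability'
--
--     for pattern in equity_patterns:
--         if pattern in parent_lower:
--             return 'equity'
--
--     # Check ledger name as fallback
--     for pattern in revenue_patterns:
--         if pattern in name_lower:
--             return 'revenue'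
--
--     for pattern in expense_patterns:
--         if pattern in name_lower:
--             return 'expense'
--
--     for pattern in asset_patterns:
--         if pattern in name_lower:
--             return 'asset'
--
--     for pattern in liability_patterns:
--         if pattern in name_lower:
--             return 'liability'
--
--     for pattern in equity_patterns:
--         if pattern in name_lower:
--             return 'equity'
--
--     return 'other'
-- ===== SOURCE B (Python) =====
-- # B: instead of staged category-by-category scans with early return, flatten all
-- # patterns once into a single pattern -> (priority, label) map (first occurrence
-- # wins, so a pattern shared by two categories keeps its higher-priority label)
-- # and classify a string with ONE min-accumulator pass over that flat map.
-- # Correct because the category returned by A is exactly the lowest-priority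
-- # category that has a matching pattern, checked on the parent first.
--
-- _CATEGORY_TABLE = [
--     ('revenue', [
--         'sales', 'income', 'revenue', 'receipt', 'service', 'commission',
--         'interest income', 'discount received', 'profit on sale', 'rent income',
--         'dividend', 'royalty', 'consultancy', 'fees', 'subscription', 'membership'
--     ]),
--     ('expense', [
--         'expense', 'purchase', 'cost', 'salary', 'wages', 'rent', 'electricity',
--         'telephone', 'internet', 'fuel', 'freight', 'insurance', 'depreciation',
--         'interest paid', 'interest expense', 'bank charges', 'office', 'travelling',
--         'advertisement', 'marketing', 'repairs', 'maintenance', 'professional fees',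
--         'discount allowed', 'tax', 'printing', 'stationery', 'postage', 'conveyance',
--         'legal', 'audit', 'vehicle', 'water', 'power', 'consumables'
--     ]),
--     ('asset', [
--         'asset', 'bank', 'cash', 'fixed asset', 'current asset', 'investment',
--         'stock', 'inventory', 'debtors', 'receivable', 'advance', 'deposit',
--         'plant', 'machinery', 'equipment', 'furniture', 'vehicle', 'building',
--         'land', 'computer'
--     ]),
--     ('liability', [
--         'liability', 'loan', 'creditors', 'payable', 'outstanding', 'provision',
--         'duty', 'sundry creditors', 'secured loan', 'unsecured loan', 'borrowing'
--     ]),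
--     ('equity', [
--         'capital', 'equity', 'reserve', 'surplus', 'profit and loss'
--     ]),
-- ]
--
-- # Flat priority map: pattern -> (category index, label); first occurrence wins.
-- _PATTERN_PRIORITY = {}
-- for _i, (_label, _ps) in enumerate(_CATEGORY_TABLE):
--     for _p in _ps:
--         _PATTERN_PRIORITY.setdefault(_p, (_i, _label))
--
--
-- def _best_category(s):
--     """Single pass: the (priority, label) of the best (lowest-index) matching pattern, else None."""
--     best = None
--     for p, v in _PATTERN_PRIORITY.items():
--         if p in s and (best is None or v[0] < best[0]):
--             best = v
--     return best
--
--
-- def _enhanced_categorize_ledger(name: str, parent: str, is_revenue: bool, is_expense: bool) -> str: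
--     if is_revenue:
--         return 'revenue'
--     if is_expense:
--         return 'expense'
--     best = _best_category(parent.lower()) or _best_category(name.lower())
--     return best[1] if best is not None else 'other'
-- ===== Notes on version B (the rewrite author's own statement) =====
-- stated objective: alternative
-- what changed: Replaces A's ten staged per-category substring scans (with early return per category) by a flat pattern->(priority,label) map built once with first-occurrence-wins, and a single min-accumulator pass over that map per string; parent still takes precedence over name.
import Mathlib
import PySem

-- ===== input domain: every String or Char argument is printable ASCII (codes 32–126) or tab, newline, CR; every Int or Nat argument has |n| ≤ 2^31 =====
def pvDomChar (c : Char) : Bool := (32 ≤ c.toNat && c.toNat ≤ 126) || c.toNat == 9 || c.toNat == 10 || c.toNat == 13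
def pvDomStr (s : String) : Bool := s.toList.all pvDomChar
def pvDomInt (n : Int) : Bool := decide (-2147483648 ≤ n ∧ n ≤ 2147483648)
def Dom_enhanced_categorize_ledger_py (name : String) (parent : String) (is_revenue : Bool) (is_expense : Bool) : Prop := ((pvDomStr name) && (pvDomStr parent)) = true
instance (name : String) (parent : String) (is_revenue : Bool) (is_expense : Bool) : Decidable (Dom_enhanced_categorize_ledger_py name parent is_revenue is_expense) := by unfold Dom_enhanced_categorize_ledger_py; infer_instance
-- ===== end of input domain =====

-- B replaces A's ten staged category-by-category scans (with early return) by one flat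
-- pattern -> (priority, label) map built once (first occurrence wins) and a single
-- min-accumulator pass over it per string (objective: alternative).

-- ===== PORT A =====
-- A's five pattern lists are locals of the Python function; hoisted as named constants
-- so the port stays readable. Each 'for pattern in ps: if pattern in s: return c' loop is
-- transliterated as 'if ps.any (pattern in s) then c else …' (early-exit scan).
def pvRevenuePatterns : List String :=
  ["sales", "income", "revenue", "receipt", "service", "commission",
   "interest income", "discount received", "profit on sale", "rent income",
   "dividend", "royalty", "consultancy", "fees", "subscription", "membership"]
def pvExpensePatterns : List String :=
  ["expense", "purchase", "cost", "salary", "wages", "rent", "electricity",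
   "telephone", "internet", "fuel", "freight", "insurance", "depreciation",
   "interest paid", "interest expense", "bank charges", "office", "travelling",
   "advertisement", "marketing", "repairs", "maintenance", "professional fees",
   "discount allowed", "tax", "printing", "stationery", "postage", "conveyance",
   "legal", "audit", "vehicle", "water", "power", "consumables"]
def pvAssetPatterns : List String :=
  ["asset", "bank", "cash", "fixed asset", "current asset", "investment",
   "stock", "inventory", "debtors", "receivable", "advance", "deposit",
   "plant", "machinery", "equipment", "furniture", "vehicle", "building",
   "land", "computer"]
def pvLiabilityPatterns : List String :=
  ["liability", "loan", "creditors", "payable", "outstanding", "provision",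
   "duty", "sundry creditors", "secured loan", "unsecured loan", "borrowing"]
def pvEquityPatterns : List String :=
  ["capital", "equity", "reserve", "surplus", "profit and loss"]

def enhanced_categorize_ledger_py (name : String) (parent : String) (is_revenue : Bool) (is_expense : Bool) : String :=
  let name_lower := PySem.Str.lower name
  let parent_lower := PySem.Str.lower parent
  if is_revenue then "revenue"
  else if is_expense then "expense"
  else if pvRevenuePatterns.any (fun pattern => PySem.Str.isIn pattern parent_lower) then "revenue"
  else if pvExpensePatterns.any (fun pattern => PySem.Str.isIn pattern parent_lower) then "expense"
  else if pvAssetPatterns.any (fun pattern => PySem.Str.isIn pattern parent_lower) then "asset"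
  else if pvLiabilityPatterns.any (fun pattern => PySem.Str.isIn pattern parent_lower) then "liability"
  else if pvEquityPatterns.any (fun pattern => PySem.Str.isIn pattern parent_lower) then "equity"
  else if pvRevenuePatterns.any (fun pattern => PySem.Str.isIn pattern name_lower) then "revenue"
  else if pvExpensePatterns.any (fun pattern => PySem.Str.isIn pattern name_lower) then "expense"
  else if pvAssetPatterns.any (fun pattern => PySem.Str.isIn pattern name_lower) then "asset"
  else if pvLiabilityPatterns.any (fun pattern => PySem.Str.isIn pattern name_lower) then "liability"
  else if pvEquityPatterns.any (fun pattern => PySem.Str.isIn pattern name_lower) then "equity"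
  else "other"

-- ===== PORT B =====
-- Source B's ordered _CATEGORY_TABLE (module-level constant).
def pvCategoryTable : List (String × List String) :=
  [("revenue", ["sales", "income", "revenue", "receipt", "service", "commission",
      "interest income", "discount received", "profit on sale", "rent income",
      "dividend", "royalty", "consultancy", "fees", "subscription", "membership"]),
   ("expense", ["expense", "purchase", "cost", "salary", "wages", "rent", "electricity",
      "telephone", "internet", "fuel", "freight", "insurance", "depreciation",
      "interest paid", "interest expense", "bank charges", "office", "travelling",
      "advertisement", "marketing", "repairs", "maintenance", "professional fees",
      "discount allowed", "tax", "printing", "stationery", "postage", "conveyance",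
      "legal", "audit", "vehicle", "water", "power", "consumables"]),
   ("asset", ["asset", "bank", "cash", "fixed asset", "current asset", "investment",
      "stock", "inventory", "debtors", "receivable", "advance", "deposit",
      "plant", "machinery", "equipment", "furniture", "vehicle", "building",
      "land", "computer"]),
   ("liability", ["liability", "loan", "creditors", "payable", "outstanding", "provision",
      "duty", "sundry creditors", "secured loan", "unsecured loan", "borrowing"]),
   ("equity", ["capital", "equity", "reserve", "surplus", "profit and loss"])]

-- Source B's _PATTERN_PRIORITY: flat dict pattern -> (category index, label), setdefault = first wins.
def pvPatternPriority : PySem.Dict String (Int × String) :=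
  (PySem.List.enumerate pvCategoryTable).foldl
    (fun d il => il.2.2.foldl (fun d p => d.setdefault p (il.1, il.2.1)) d)
    PySem.Dict.empty

-- Source B's _best_category: one min-accumulator pass over the flat map's items.
def pvBestCategory (s : String) : Option (Int × String) :=
  pvPatternPriority.items.foldl
    (fun best pv =>
      if PySem.Str.isIn pv.1 s &&
         (match best with | none => true | some b => decide (pv.2.1 < b.1))
      then some pv.2 else best)
    none

def enhanced_categorize_ledger_py_alt (name : String) (parent : String) (is_revenue : Bool) (is_expense : Bool) : String :=
  if is_revenue then "revenue"
  else if is_expense then "expense"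
  else
    -- Python 'x or y' on Option-like truthiness (tuples are truthy): first some wins.
    match (pvBestCategory (PySem.Str.lower parent)).orElse (fun _ => pvBestCategory (PySem.Str.lower name)) with
    | some b => b.2
    | none => "other"

-- ===== PRECONDITION & SPEC =====
def Spec_enhanced_categorize_ledger_py (name : String) (parent : String) (is_revenue : Bool) (is_expense : Bool) (out : String) : Prop := out = enhanced_categorize_ledger_py_alt name parent is_revenue is_expense
instance (name : String) (parent : String) (is_revenue : Bool) (is_expense : Bool) (out : String) : Decidable (Spec_enhanced_categorize_ledger_py name parent is_revenue is_expense out) := by unfold Spec_enhanced_categorize_ledger_py; infer_instance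

-- ===== CLAIM (what is proved, stated in full; the proofs are below) =====
def Claim_equal_enhanced_categorize_ledger_py : Prop := ∀ (name : String) (parent : String) (is_revenue : Bool) (is_expense : Bool), Dom_enhanced_categorize_ledger_py name parent is_revenue is_expense → Spec_enhanced_categorize_ledger_py name parent is_revenue is_expense (enhanced_categorize_ledger_py name parent is_revenue is_expense)

-- ===== LEMMAS AND PROOFS =====

-- The asset list minus 'vehicle' (which the flat map already owns at expense priority).
def pvAssetPatterns' : List String :=
  ["asset", "bank", "cash", "fixed asset", "current asset", "investment",
   "stock", "inventory", "debtors", "receivable", "advance", "deposit",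
   "plant", "machinery", "equipment", "furniture", "building",
   "land", "computer"]

-- The min-accumulator step, with the pattern test already decided.
def pvStepV (acc : Option (Int × String)) (v : Int × String) : Option (Int × String) :=
  if (match acc with | none => true | some b => decide (v.1 < b.1)) then some v else acc

theorem pvStepV_idem (acc : Option (Int × String)) (v : Int × String) :
    pvStepV (pvStepV acc v) v = pvStepV acc v := by
  cases acc with
  | none => simp [pvStepV]
  | some b => by_cases h : v.1 < b.1 <;> simp [pvStepV, h]

-- Folding the min-accumulator step over a constant-priority block is one conditional step.
theorem pvBlockFold (s : String) (v : Int × String) (ps : List String) (acc : Option (Int × String)) :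
    List.foldl
      (fun best pv =>
        if PySem.Str.isIn pv.1 s &&
           (match best with | none => true | some b => decide (pv.2.1 < b.1))
        then some pv.2 else best)
      acc (ps.map (fun p => (p, v)))
    = if ps.any (fun p => PySem.Str.isIn p s) then pvStepV acc v else acc := by
  induction ps generalizing acc with
  | nil => simp
  | cons p rest ih =>
    simp only [List.map_cons, List.foldl_cons, List.any_cons]
    have hstep : (if PySem.Str.isIn p s &&
         (match acc with | none => true | some b => decide (v.1 < b.1))
        then some v else acc) = if PySem.Str.isIn p s then pvStepV acc v else acc := by
      cases PySem.Str.isIn p s <;> simp [pvStepV]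
    rw [hstep]
    by_cases h : PySem.Str.isIn p s = true
    · simp only [h, Bool.true_or, if_true]
      rw [ih (pvStepV acc v)]
      cases rest.any (fun p => PySem.Str.isIn p s) <;> simp [pvStepV_idem]
    · have h' : PySem.Str.isIn p s = false := by simpa using h
      simp only [h', Bool.false_or]
      exact ih acc

-- The flat map's items are exactly five constant-priority blocks, asset without 'vehicle'.
set_option maxRecDepth 100000 in
theorem pvItems_eq : pvPatternPriority.items =
    pvRevenuePatterns.map (fun p => (p, ((0 : Int), "revenue")))
    ++ pvExpensePatterns.map (fun p => (p, ((1 : Int), "expense")))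
    ++ pvAssetPatterns'.map (fun p => (p, ((2 : Int), "asset")))
    ++ pvLiabilityPatterns.map (fun p => (p, ((3 : Int), "liability")))
    ++ pvEquityPatterns.map (fun p => (p, ((4 : Int), "equity"))) := by
  decide

-- One pass over the flat map = the five-stage priority chain (on the vehicle-free asset list).
theorem pvBest_eq (s : String) : pvBestCategory s =
    (if pvRevenuePatterns.any (fun pattern => PySem.Str.isIn pattern s) then some ((0 : Int), "revenue")
     else if pvExpensePatterns.any (fun pattern => PySem.Str.isIn pattern s) then some ((1 : Int), "expense")
     else if pvAssetPatterns'.any (fun pattern => PySem.Str.isIn pattern s) then some ((2 : Int), "asset")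
     else if pvLiabilityPatterns.any (fun pattern => PySem.Str.isIn pattern s) then some ((3 : Int), "liability")
     else if pvEquityPatterns.any (fun pattern => PySem.Str.isIn pattern s) then some ((4 : Int), "equity")
     else none) := by
  unfold pvBestCategory
  rw [pvItems_eq]
  rw [List.foldl_append, List.foldl_append, List.foldl_append, List.foldl_append]
  rw [pvBlockFold, pvBlockFold, pvBlockFold, pvBlockFold, pvBlockFold]
  generalize pvRevenuePatterns.any (fun pattern => PySem.Str.isIn pattern s) = b0
  generalize pvExpensePatterns.any (fun pattern => PySem.Str.isIn pattern s) = b1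
  generalize pvAssetPatterns'.any (fun pattern => PySem.Str.isIn pattern s) = b2
  generalize pvLiabilityPatterns.any (fun pattern => PySem.Str.isIn pattern s) = b3
  generalize pvEquityPatterns.any (fun pattern => PySem.Str.isIn pattern s) = b4
  revert b0 b1 b2 b3 b4
  decide

-- A's asset scan splits into B's vehicle-free asset scan plus the 'vehicle' test.
theorem pvAssetAny_split (f : String → Bool) :
    pvAssetPatterns.any f = (pvAssetPatterns'.any f || f "vehicle") := by
  cases hv : f "vehicle" <;>
    simp [pvAssetPatterns, pvAssetPatterns', List.any_cons, List.any_nil, hv,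
      Bool.or_comm, Bool.or_left_comm]

-- 'vehicle' is an expense pattern, so a vehicle match forces the expense scan true.
theorem pvVehicle_expense (s : String) (h : PySem.Str.isIn "vehicle" s = true) :
    pvExpensePatterns.any (fun pattern => PySem.Str.isIn pattern s) = true :=
  List.any_eq_true.mpr ⟨"vehicle", by decide, h⟩

-- One flat pass = A's five-stage scan over the FULL lists, per string.
theorem pvBest_eq_full (s : String) : pvBestCategory s =
    (if pvRevenuePatterns.any (fun pattern => PySem.Str.isIn pattern s) then some ((0 : Int), "revenue")
     else if pvExpensePatterns.any (fun pattern => PySem.Str.isIn pattern s) then some ((1 : Int), "expense")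
     else if pvAssetPatterns.any (fun pattern => PySem.Str.isIn pattern s) then some ((2 : Int), "asset")
     else if pvLiabilityPatterns.any (fun pattern => PySem.Str.isIn pattern s) then some ((3 : Int), "liability")
     else if pvEquityPatterns.any (fun pattern => PySem.Str.isIn pattern s) then some ((4 : Int), "equity")
     else none) := by
  rw [pvBest_eq, pvAssetAny_split]
  have h := pvVehicle_expense s
  generalize hv : PySem.Str.isIn "vehicle" s = v at h ⊢
  generalize pvRevenuePatterns.any (fun pattern => PySem.Str.isIn pattern s) = b0
  generalize he : pvExpensePatterns.any (fun pattern => PySem.Str.isIn pattern s) = b1 at h ⊢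
  generalize pvAssetPatterns'.any (fun pattern => PySem.Str.isIn pattern s) = b2
  generalize pvLiabilityPatterns.any (fun pattern => PySem.Str.isIn pattern s) = b3
  generalize pvEquityPatterns.any (fun pattern => PySem.Str.isIn pattern s) = b4
  clear hv he
  revert h
  revert v b0 b1 b2 b3 b4
  decide

-- ===== VERDICT (by name: the statement is the Claim_ definition above) =====
theorem enhanced_categorize_ledger_py_spec : Claim_equal_enhanced_categorize_ledger_py := by
  intro name parent is_revenue is_expense _
  unfold Spec_enhanced_categorize_ledger_py enhanced_categorize_ledger_py enhanced_categorize_ledger_py_alt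
  cases is_revenue with
  | true => simp
  | false =>
  cases is_expense with
  | true => simp
  | false =>
  simp only [Bool.false_eq_true, if_false]
  rw [pvBest_eq_full (PySem.Str.lower parent), pvBest_eq_full (PySem.Str.lower name)]
  generalize pvRevenuePatterns.any (fun pattern => PySem.Str.isIn pattern (PySem.Str.lower parent)) = rP
  generalize pvExpensePatterns.any (fun pattern => PySem.Str.isIn pattern (PySem.Str.lower parent)) = eP
  generalize pvAssetPatterns.any (fun pattern => PySem.Str.isIn pattern (PySem.Str.lower parent)) = aP
  generalize pvLiabilityPatterns.any (fun pattern => PySem.Str.isIn pattern (PySem.Str.lower parent)) = lP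
  generalize pvEquityPatterns.any (fun pattern => PySem.Str.isIn pattern (PySem.Str.lower parent)) = qP
  generalize pvRevenuePatterns.any (fun pattern => PySem.Str.isIn pattern (PySem.Str.lower name)) = rN
  generalize pvExpensePatterns.any (fun pattern => PySem.Str.isIn pattern (PySem.Str.lower name)) = eN
  generalize pvAssetPatterns.any (fun pattern => PySem.Str.isIn pattern (PySem.Str.lower name)) = aN
  generalize pvLiabilityPatterns.any (fun pattern => PySem.Str.isIn pattern (PySem.Str.lower name)) = lN
  generalize pvEquityPatterns.any (fun pattern => PySem.Str.isIn pattern (PySem.Str.lower name)) = qN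
  revert rP eP aP lP qP rN eN aN lN qN
  decide
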